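-- pv_equiv track=rewrite | github.com/astro-kevin/octavian | octavian/mpi/scheduler.py | _expand_bracket_expression
-- ===== SOURCE A (Python) =====
-- from typing import Dict, Iterable, List, Mapping, Optional, Sequence, Tuple, TYPE_CHECKING
--
-- def _expand_bracket_expression(expr: str) -> List[str]:
--   if not expr:
--     return ['']
--   start = expr.find('[')
--   if start == -1:
--     return [expr]
--   end = expr.find(']', start)
--   if end == -1:
--     return [expr]
--   prefix = expr[:start]
--   suffix = expr[end + 1:]
--   body = expr[start + 1:end]
--
--   expansions: List[str] = []
--   for token in body.split(','):
--     token = token.strip()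
--     if not token:
--       continue
--     sequence: List[str]
--     if '-' in token:
--       start_token, end_token = token.split('-', 1)
--       width = len(start_token)
--       try:
--         start_int = int(start_token)
--         end_int = int(end_token)
--       except ValueError:
--         sequence = [token]
--       else:
--         step = 1 if end_int >= start_int else -1
--         rng = range(start_int, end_int + step, step)
--         sequence = [f"{value:0{width}d}" for value in rng]
--     else:
--       sequence = [token]
--
--     tails = _expand_bracket_expression(suffix)
--     for value in sequence:
--       if tails:
--         for tail in tails:
--           expansions.append(prefix + value + tail)
--       else:
--         expansions.append(prefix + value)
--
--   return expansions or [expr]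
-- ===== SOURCE B (Python) =====
-- from typing import List
--
--
-- def _expand_bracket_expression(expr: str) -> List[str]:
--   # Iterative left-to-right expansion: keep a list of partial results and
--   # consume one bracket group per loop iteration instead of recursing.
--   result = ['']
--   s = expr
--   while True:
--     start = s.find('[')
--     if start == -1:
--       return [r + s for r in result]
--     end = s.find(']', start)
--     if end == -1:
--       return [r + s for r in result]
--     prefix = s[:start]
--     body = s[start + 1:end]
--     suffix = s[end + 1:]
--
--     heads: List[str] = []
--     for token in body.split(','):
--       token = token.strip()
--       if not token:
--         continue
--       sequence = [token]
--       if '-' in token: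
--         start_token, end_token = token.split('-', 1)
--         try:
--           start_int = int(start_token)
--           end_int = int(end_token)
--         except ValueError:
--           pass
--         else:
--           step = 1 if end_int >= start_int else -1
--           sequence = [str(v).zfill(len(start_token))
--                       for v in range(start_int, end_int + step, step)]
--       heads.extend(prefix + v for v in sequence)
--
--     if not heads:
--       return [r + s for r in result]
--     result = [r + h for r in result for h in heads]
--     s = suffix
-- ===== Notes on version B (the rewrite author's own statement) =====
-- stated objective: alternative
-- what changed: Replaces the recursion on the suffix (with tails recomputed inside the token loop) by an iterative loop that keeps a list of partial results and consumes one bracket group per iteration, building each group's head list once and taking the cross product.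
import Mathlib
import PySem

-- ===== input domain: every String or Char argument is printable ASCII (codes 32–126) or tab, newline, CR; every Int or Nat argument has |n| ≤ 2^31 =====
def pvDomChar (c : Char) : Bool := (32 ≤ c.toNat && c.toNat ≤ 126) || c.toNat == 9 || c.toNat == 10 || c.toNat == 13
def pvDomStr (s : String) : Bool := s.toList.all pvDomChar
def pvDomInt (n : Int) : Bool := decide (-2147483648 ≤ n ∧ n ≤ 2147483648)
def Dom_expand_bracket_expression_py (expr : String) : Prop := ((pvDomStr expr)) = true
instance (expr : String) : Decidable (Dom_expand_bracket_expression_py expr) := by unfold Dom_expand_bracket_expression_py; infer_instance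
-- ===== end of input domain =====

-- B replaces A's recursion on the suffix by an iterative loop over bracket groups
-- keeping a list of partial results (objective: alternative; return values proved equal).

-- ===== PORT A =====
-- Token → sequence logic, textually identical in both Pythons, so shared by both ports.
-- f"{v:0{width}d}" on an int equals str(v).zfill(width), i.e. PySem.Chars.zfill (PySem.Int.toChars v) width (exact).
def pvTokenSeq (token : List Char) : List (List Char) :=
  if PySem.Chars.isIn ['-'] token then
    match PySem.Chars.splitOnMax token ['-'] 1 with
    | [startTok, endTok] =>
      match PySem.Int.ofChars? startTok, PySem.Int.ofChars? endTok with
      | some startInt, some endInt =>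
        let step : Int := if endInt ≥ startInt then 1 else -1
        (PySem.List.pyRange startInt (endInt + step) step).map
          (fun v => PySem.Chars.zfill (PySem.Int.toChars v) (startTok.length : Int))
      | _, _ => [token]
    | _ => [token]   -- unreachable: split('-',1) with '-' in token yields exactly two parts
  else [token]

-- fuel = expr.length + 1 suffices: the suffix passed to the recursive call is strictly shorter.
def pvAExpand : Nat → List Char → List (List Char)
  | 0, _ => []   -- never reached with adequate fuel
  | fuel+1, cs =>
    if cs = [] then [[]]
    else
      let start := PySem.Chars.find cs ['[']
      if start = -1 then [cs]
      else
        let e := PySem.Chars.findFrom cs [']'] start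
        if e = -1 then [cs]
        else
          let pre := PySem.Chars.slice cs none (some start)
          let suffix := PySem.Chars.slice cs (some (e+1)) none
          let body := PySem.Chars.slice cs (some (start+1)) (some e)
          let expansions := (PySem.Chars.splitOn body [',']).foldl (fun acc token0 =>
            let token := PySem.Chars.strip token0
            if token = [] then acc
            else
              let sequence := pvTokenSeq token
              let tails := pvAExpand fuel suffix
              sequence.foldl (fun acc2 v =>
                if tails ≠ [] then acc2 ++ tails.map (fun tail => pre ++ v ++ tail)
                else acc2 ++ [pre ++ v]) acc) []
          if expansions = [] then [cs] else expansions

def expand_bracket_expression_py (expr : String) : List String :=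
  (pvAExpand (expr.toList.length + 1) expr.toList).map String.ofList

-- ===== PORT B =====
def pvBHeads (pre body : List Char) : List (List Char) :=
  (PySem.Chars.splitOn body [',']).foldl (fun acc token0 =>
    let token := PySem.Chars.strip token0
    if token = [] then acc
    else acc ++ (pvTokenSeq token).map (fun v => pre ++ v)) []

def pvBLoop : Nat → List (List Char) → List Char → List (List Char)
  | 0, result, _ => result   -- never reached with adequate fuel
  | fuel+1, result, s =>
    let start := PySem.Chars.find s ['[']
    if start = -1 then result.map (fun r => r ++ s)
    else
      let e := PySem.Chars.findFrom s [']'] start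
      if e = -1 then result.map (fun r => r ++ s)
      else
        let pre := PySem.Chars.slice s none (some start)
        let body := PySem.Chars.slice s (some (start+1)) (some e)
        let suffix := PySem.Chars.slice s (some (e+1)) none
        let heads := pvBHeads pre body
        if heads = [] then result.map (fun r => r ++ s)
        else pvBLoop fuel (result.flatMap (fun r => heads.map (fun h => r ++ h))) suffix

def expand_bracket_expression_py_alt (expr : String) : List String :=
  (pvBLoop (expr.toList.length + 1) [[]] expr.toList).map String.ofList

-- ===== PRECONDITION & SPEC =====
def Spec_expand_bracket_expression_py (expr : String) (out : List String) : Prop := out = expand_bracket_expression_py_alt expr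
instance (expr : String) (out : List String) : Decidable (Spec_expand_bracket_expression_py expr out) := by unfold Spec_expand_bracket_expression_py; infer_instance

-- ===== CLAIM (what is proved, stated in full; the proofs are below) =====
def Claim_equal_expand_bracket_expression_py : Prop := ∀ (expr : String), Dom_expand_bracket_expression_py expr → Spec_expand_bracket_expression_py expr (expand_bracket_expression_py expr)

-- ===== LEMMAS AND PROOFS =====

-- A never returns the empty list when it has fuel (every return branch is nonempty).
lemma pvAExpand_ne_nil (fuel : Nat) (h : 0 < fuel) (cs : List Char) : pvAExpand fuel cs ≠ [] := by
  obtain ⟨m, rfl⟩ := Nat.exists_eq_add_of_lt h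
  simp only [pvAExpand, Nat.zero_add]
  split_ifs <;> simp_all

-- B's token fold in accumulator-pulled-out form.
lemma pvBFold_append (pre : List Char) :
    ∀ (ts : List (List Char)) (acc : List (List Char)),
      ts.foldl (fun acc token0 =>
        if PySem.Chars.strip token0 = [] then acc
        else acc ++ (pvTokenSeq (PySem.Chars.strip token0)).map (fun v => pre ++ v)) acc
      = acc ++ ts.foldl (fun acc token0 =>
          if PySem.Chars.strip token0 = [] then acc
          else acc ++ (pvTokenSeq (PySem.Chars.strip token0)).map (fun v => pre ++ v)) [] := by
  intro ts
  induction ts with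
  | nil => simp
  | cons t ts ih =>
    intro acc
    simp only [List.foldl_cons]
    by_cases h : PySem.Chars.strip t = []
    · simp only [h, ite_true]
      exact ih acc
    · simp only [h, ite_false, List.nil_append]
      rw [ih, ih (List.map (fun v => pre ++ v) (pvTokenSeq (PySem.Chars.strip t)))]
      simp

-- A's expansions accumulator is the flatMap of B's head list with the tails.
lemma pvExp_eq_heads (pre : List Char) (tails : List (List Char)) :
    ∀ (toks : List (List Char)) (acc : List (List Char)),
      toks.foldl (fun acc token0 =>
        if PySem.Chars.strip token0 = [] then acc
        else
          (pvTokenSeq (PySem.Chars.strip token0)).foldl (fun acc2 v =>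
            acc2 ++ tails.map (fun tail => pre ++ v ++ tail)) acc) acc
      = acc ++ (toks.foldl (fun acc token0 =>
          if PySem.Chars.strip token0 = [] then acc
          else acc ++ (pvTokenSeq (PySem.Chars.strip token0)).map (fun v => pre ++ v)) []).flatMap
          (fun h => tails.map (fun tail => h ++ tail)) := by
  intro toks
  induction toks with
  | nil => simp
  | cons t ts ih =>
    intro acc
    simp only [List.foldl_cons]
    by_cases h : PySem.Chars.strip t = []
    · simp only [h, ite_true, List.nil_append]
      exact ih acc
    · simp only [h, ite_false, List.nil_append]
      rw [PySem.List.foldl_append_eq_flatMap (fun v => tails.map (fun tail => pre ++ v ++ tail))]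
      rw [ih, pvBFold_append, pvBFold_append pre ts (List.map (fun v => pre ++ v) (pvTokenSeq (PySem.Chars.strip t)))]
      simp [List.flatMap_append, List.append_assoc]
      rw [List.flatMap_map]
      simp [List.append_assoc]


-- Loop invariant: the iterative loop computes result x (A's expansion of s).
lemma pvBLoop_eq : ∀ (fuel : Nat) (s : List Char) (result : List (List Char)),
    s.length < fuel →
    pvBLoop fuel result s = result.flatMap (fun r => (pvAExpand fuel s).map (fun t => r ++ t)) := by
  intro fuel
  induction fuel with
  | zero => intro s result hf; exact absurd hf (by omega)
  | succ fuel ih =>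
    intro s result hf
    by_cases hcs : s = []
    · subst hcs
      simp [pvBLoop, pvAExpand, show PySem.Chars.find [] ['['] = -1 from rfl]
    · simp only [pvBLoop, pvAExpand, if_neg hcs]
      by_cases hk : PySem.Chars.find s ['['] = -1
      · simp only [hk, ite_true]
        exact List.map_eq_flatMap
      · simp only [hk, ite_false]
        by_cases he : PySem.Chars.findFrom s [']'] (PySem.Chars.find s ['[']) = -1
        · simp only [he, ite_true]
          exact List.map_eq_flatMap
        · simp only [he, ite_false]
          set k := PySem.Chars.find s ['['] with hkdef
          set e := PySem.Chars.findFrom s [']'] k with hedef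
          set pre := PySem.Chars.slice s none (some k) with hpredef
          set body := PySem.Chars.slice s (some (k+1)) (some e) with hbodydef
          set suffix := PySem.Chars.slice s (some (e+1)) with hsufdef
          have hk0 : 0 ≤ k := (PySem.Chars.find_nonneg_iff s ['[']).2 ((PySem.Chars.find_ne_neg_one_iff s ['[']).1 hk)
          have hkl : k ≤ (s.length : Int) := PySem.Chars.find_le_length s ['[']
          have hkk : k = ((k.toNat : Nat) : Int) := (Int.toNat_of_nonneg hk0).symm
          have hee : e = if PySem.Chars.find (List.drop k.toNat s) [']'] = -1 then -1
              else (k.toNat : Int) + PySem.Chars.find (List.drop k.toNat s) [']'] := by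
            rw [hedef, hkk]
            exact PySem.Chars.findFrom_natCast s [']'] k.toNat (by omega)
          have he0 : 0 ≤ e := by
            have hge := PySem.Chars.neg_one_le_find (List.drop k.toNat s) [']']
            rw [hee] at he ⊢
            split_ifs at he ⊢ with h4
            · exact absurd rfl he
            · omega
          have hs1 : 0 < s.length := List.length_pos_of_ne_nil hcs
          have hsuf : suffix = s.drop (e+1).toNat := by
            rw [hsufdef]
            exact PySem.List.slice_from s (by omega)
          have hsl : suffix.length < fuel := by
            rw [hsuf, List.length_drop]
            omega
          have ht : pvAExpand fuel suffix ≠ [] := pvAExpand_ne_nil fuel (by omega) suffix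
          simp only [ht, ne_eq, not_false_iff, ite_true]
          rw [pvExp_eq_heads pre (pvAExpand fuel suffix)]
          simp only [List.nil_append]
          have hB : pvBHeads pre body = (PySem.Chars.splitOn body [',']).foldl (fun acc token0 =>
              if PySem.Chars.strip token0 = [] then acc
              else acc ++ (pvTokenSeq (PySem.Chars.strip token0)).map (fun v => pre ++ v)) [] := rfl
          rw [← hB]
          by_cases hh : pvBHeads pre body = []
          · simp only [hh, ite_true, List.flatMap_nil, List.map_nil]
            exact List.map_eq_flatMap
          · have hfl : (pvBHeads pre body).flatMap
                (fun h => (pvAExpand fuel suffix).map (fun tail => h ++ tail)) ≠ [] := by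
              simp only [ne_eq, List.flatMap_eq_nil_iff, not_forall]
              refine ⟨(pvBHeads pre body).head hh, List.head_mem hh, ?_⟩
              simp [ht]
            rw [if_neg hh, if_neg hfl, ih suffix _ hsl]
            generalize pvBHeads pre body = H
            generalize pvAExpand fuel suffix = T
            induction result with
            | nil => simp
            | cons r rs ihr =>
              simp only [List.flatMap_cons, List.flatMap_append, ihr]
              congr 1
              rw [List.flatMap_map, List.map_flatMap]
              simp [List.map_map, Function.comp_def, List.append_assoc]

-- ===== VERDICT (by name: the statement is the Claim_ definition above) =====
theorem expand_bracket_expression_py_spec : Claim_equal_expand_bracket_expression_py := by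
  intro expr _
  unfold Spec_expand_bracket_expression_py expand_bracket_expression_py expand_bracket_expression_py_alt
  rw [pvBLoop_eq (expr.toList.length + 1) expr.toList [[]] (by omega)]
  simp
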